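-- pv_equiv track=rewrite | github.com/GelilaT/competitive_programming | number of subarrays with GCD equal to k.py | subarrayGCD
-- ===== SOURCE A (Python) =====
-- from typing import List
--
-- def subarrayGCD(nums: List[int], k: int) -> int:
--     count = 0
--     def GCD(a, b):
--         if b == 0:
--             return a
--         else:
--             return GCD(b, a % b)
--     for left in range(len(nums)):
--         cur = 0
--         for right in range(left,len(nums)):
--             cur = GCD(cur,nums[right])
--             if cur == k:
--                 count += 1
--     return count
-- ===== SOURCE B (Python) =====
-- def subarrayGCD(nums, k):
--     # Per-endpoint dict of distinct running GCD values with multiplicities: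
--     # O(n log V) instead of O(n^2) subarray scans.
--     def gcd(a, b):
--         while b != 0:
--             a, b = b, a % b
--         return a
--     count = 0
--     prev = {}  # gcd value -> number of subarray start points ending just before here
--     for x in nums:
--         cur = {}
--         g0 = gcd(0, x)
--         cur[g0] = cur.get(g0, 0) + 1
--         for g, c in prev.items():
--             ng = gcd(g, x)
--             cur[ng] = cur.get(ng, 0) + c
--         count += cur.get(k, 0)
--         prev = cur
--     return count
-- ===== Notes on version B (the rewrite author's own statement) =====
-- stated objective: faster
-- what changed: Replaces the O(n^2) scan over all (left,right) subarray pairs by a single left-to-right pass that keeps, for the current endpoint, a dict of the distinct running-GCD values with their start-point multiplicities (GCD values of nested subarrays form short divisor chains), adding the count stored under k at each step.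
import Mathlib
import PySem

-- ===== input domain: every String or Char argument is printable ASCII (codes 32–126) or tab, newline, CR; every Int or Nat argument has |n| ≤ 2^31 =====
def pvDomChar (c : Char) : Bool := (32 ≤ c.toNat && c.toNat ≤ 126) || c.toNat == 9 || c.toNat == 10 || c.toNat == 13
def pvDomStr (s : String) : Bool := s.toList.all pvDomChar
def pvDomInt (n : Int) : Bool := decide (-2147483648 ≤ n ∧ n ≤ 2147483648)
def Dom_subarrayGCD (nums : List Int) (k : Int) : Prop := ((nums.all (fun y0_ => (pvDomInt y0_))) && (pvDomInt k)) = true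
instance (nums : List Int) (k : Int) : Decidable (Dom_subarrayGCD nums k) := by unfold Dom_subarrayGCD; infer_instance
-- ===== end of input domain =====

-- B replaces A's O(n^2) double loop by one pass keeping, per endpoint, the distinct
-- running-GCD values with multiplicities in a dict (objective: faster).

-- Python's Euclid with floor-mod (shared helper: A's recursive GCD and B's while-loop
-- compute it by the identical recurrence a,b → b, a % b)
theorem pyGCD_dec (a b : Int) (h : ¬ b = 0) : (PySem.Int.mod a b).natAbs < b.natAbs := by
  rcases lt_or_gt_of_ne h with hb | hb
  · have h1 := PySem.Int.mod_neg_bounds a hb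
    omega
  · have h1 := PySem.Int.mod_nonneg a hb
    have h2 := PySem.Int.mod_lt a hb
    omega

def pyGCD (a b : Int) : Int :=
  if h : b = 0 then a else pyGCD b (PySem.Int.mod a b)
termination_by b.natAbs
decreasing_by exact pyGCD_dec a b h

-- ===== PORT A =====
def subarrayGCD (nums : List Int) (k : Int) : Int :=
  (PySem.List.pyRange 0 (PySem.List.len nums) 1).foldl
    (fun count left =>
      ((PySem.List.pyRange left (PySem.List.len nums) 1).foldl
        (fun (st : Int × Int) right =>
          let cur := pyGCD st.2 (PySem.List.pyGetD nums right 0)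
          (if cur = k then st.1 + 1 else st.1, cur))
        (count, 0)).1)
    0

-- ===== PORT B =====
def subarrayGCD_alt (nums : List Int) (k : Int) : Int :=
  (nums.foldl
    (fun (st : Int × PySem.Dict Int Int) x =>
      let g0 := pyGCD 0 x
      let d0 := (PySem.Dict.empty : PySem.Dict Int Int).modify g0 0 (· + 1)
      let cur := st.2.items.foldl
        (fun (d : PySem.Dict Int Int) p => d.modify (pyGCD p.1 x) 0 (· + p.2)) d0
      (st.1 + cur.getD k 0, cur))
    (0, PySem.Dict.empty)).1

-- ===== PRECONDITION & SPEC =====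
def Spec_subarrayGCD (nums : List Int) (k : Int) (out : Int) : Prop := out = subarrayGCD_alt nums k
instance (nums : List Int) (k : Int) (out : Int) : Decidable (Spec_subarrayGCD nums k out) := by unfold Spec_subarrayGCD; infer_instance

-- ===== CLAIM (what is proved, stated in full; the proofs are below) =====
def Claim_equal_subarrayGCD : Prop := ∀ (nums : List Int) (k : Int), Dom_subarrayGCD nums k → Spec_subarrayGCD nums k (subarrayGCD nums k)

-- ===== LEMMAS AND PROOFS =====

-- number of nonempty prefixes p of xs whose running GCD (seeded with cur) is k
def rowCount (k cur : Int) : List Int → Int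
  | [] => 0
  | x :: xs => (if pyGCD cur x = k then 1 else 0) + rowCount k (pyGCD cur x) xs

-- reference value: sum of rowCount over all suffixes (all start points)
def Aref (k : Int) : List Int → Int
  | [] => 0
  | x :: xs => rowCount k 0 (x :: xs) + Aref k xs

-- ---- A side ----
theorem innerA (k : Int) : ∀ (d : List Int) (c cur : Int),
    (d.foldl (fun (st : Int × Int) v =>
        let g := pyGCD st.2 v
        (if g = k then st.1 + 1 else st.1, g)) (c, cur)).1 = c + rowCount k cur d := by
  intro d
  induction d with
  | nil => intro c cur; simp [rowCount]
  | cons x xs ih =>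
    intro c cur
    simp only [List.foldl_cons, rowCount, ih]
    split_ifs <;> ring

theorem sumRange (k : Int) : ∀ (nums : List Int),
    ((List.range nums.length).map (fun i => rowCount k 0 (nums.drop i))).sum = Aref k nums := by
  intro nums
  induction nums with
  | nil => simp [Aref]
  | cons x xs ih =>
    rw [List.length_cons, List.range_succ_eq_map]
    simp only [List.map_cons, List.map_map, List.sum_cons, Aref]
    rw [← ih]
    congr 1

theorem A_eq_Aref (nums : List Int) (k : Int) : subarrayGCD nums k = Aref k nums := by
  unfold subarrayGCD
  rw [PySem.List.foldl_congr_mem _ _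
    (fun count left => count + rowCount k 0 (nums.drop left.toNat)) 0 ?_]
  · rw [PySem.List.foldl_add]
    simp only [zero_add, PySem.List.len_eq, PySem.List.pyRange_one, List.map_map]
    have hmap : ((List.range (((nums.length : Int)) - 0).toNat).map
        ((fun left => rowCount k 0 (nums.drop left.toNat)) ∘ fun i : ℕ => ((i : Int))))
        = (List.range nums.length).map (fun i => rowCount k 0 (nums.drop i)) := by
      have hn : (((nums.length : Int)) - 0).toNat = nums.length := by omega
      rw [hn]
      apply List.map_congr_left
      intro i _
      simp
    rw [hmap, sumRange]
  · intro acc x hx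
    have hx0 : (0 : Int) ≤ x := (PySem.List.mem_pyRange_one.mp hx).1
    simp only [PySem.List.len_eq] at *
    rw [PySem.List.foldl_pyRange_pyGetD' nums 0
      (fun (st : Int × Int) v =>
        let g := pyGCD st.2 v
        (if g = k then st.1 + 1 else st.1, g)) (acc, 0) hx0]
    exact innerA k (nums.drop x.toNat) acc 0

-- ---- B side ----
-- weighted sum of a dict's entries
def wsum (w : Int → Int) (d : PySem.Dict Int Int) : Int :=
  (d.items.map (fun p => p.2 * w p.1)).sum

theorem mapReplace (g c : Int) (w : Int → Int) :
    ∀ (l : List (Int × Int)) (v : Int), (l.map Prod.fst).Nodup → (g, v) ∈ l →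
    ((l.map (fun p => if p.1 == g then (g, v + c) else p)).map (fun p => p.2 * w p.1)).sum
      = ((l.map (fun p => p.2 * w p.1)).sum) + c * w g := by
  intro l
  induction l with
  | nil => intro v _ hm; simp at hm
  | cons p ps ih =>
    intro v hnd hm
    simp only [List.map_cons, List.nodup_cons] at hnd
    rw [List.mem_cons] at hm
    simp only [List.map_cons, List.sum_cons]
    rcases hm with hm | hm
    · rw [← hm]
      simp only [beq_self_eq_true, if_pos]
      have hfix : ps.map (fun q : Int × Int => if q.1 == g then (g, v + c) else q) = ps := by
        have := List.map_congr_left (l := ps)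
          (f := fun q : Int × Int => if q.1 == g then (g, v + c) else q) (g := id) ?_
        · simpa using this
        · intro q hq
          have hne : q.1 ≠ g := by
            intro hh
            rw [← hm] at hnd
            exact hnd.1 (by simpa [hh] using List.mem_map_of_mem (f := Prod.fst) hq)
          simp [hne]
      rw [hfix]
      ring
    · have hgps : g ∈ ps.map Prod.fst := by
        simpa using List.mem_map_of_mem (f := Prod.fst) hm
      have hne : p.1 ≠ g := fun hh => hnd.1 (hh ▸ hgps)
      rw [if_neg (by simpa using hne)]
      rw [ih v hnd.2 hm]
      ring

theorem wsum_insertAdd (w : Int → Int) (d : PySem.Dict Int Int) (hnd : d.keys.Nodup)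
    (g c : Int) : wsum w (d.modify g 0 (· + c)) = wsum w d + c * w g := by
  show wsum w (d.insert g (d.getD g 0 + c)) = wsum w d + c * w g
  by_cases hc : d.contains g = true
  · obtain ⟨v, hv⟩ : ∃ v, d.get? g = some v := by
      rw [PySem.Dict.contains_eq_isSome_get?] at hc
      exact Option.isSome_iff_exists.mp hc
    have hmem : (g, v) ∈ d.items := PySem.Dict.mem_items_of_get?_eq_some d hv
    have hgd : d.getD g 0 = v := PySem.Dict.getD_of_get?_eq_some d 0 hv
    unfold wsum
    rw [PySem.Dict.items_insert_of_contains d _ hc, hgd]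
    exact mapReplace g c w d.items v hnd hmem
  · unfold wsum
    rw [PySem.Dict.items_insert_of_not_contains d _ (by simpa using hc)]
    rw [PySem.Dict.getD_of_not_contains d 0 (by simpa using hc)]
    simp

theorem nodup_fold_keys (x : Int) (l : List (Int × Int)) (acc : PySem.Dict Int Int)
    (h : acc.keys.Nodup) :
    (l.foldl (fun (d : PySem.Dict Int Int) p => d.modify (pyGCD p.1 x) 0 (· + p.2)) acc).keys.Nodup := by
  induction l generalizing acc with
  | nil => exact h
  | cons p ps ih => exact ih _ (PySem.Dict.nodup_keys_insert _ _ _ h)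

theorem wsum_fold (x : Int) (w : Int → Int) :
    ∀ (l : List (Int × Int)) (acc : PySem.Dict Int Int), acc.keys.Nodup →
    wsum w (l.foldl (fun (d : PySem.Dict Int Int) p => d.modify (pyGCD p.1 x) 0 (· + p.2)) acc)
      = wsum w acc + (l.map (fun p => p.2 * w (pyGCD p.1 x))).sum := by
  intro l
  induction l with
  | nil => intro acc h; simp
  | cons p ps ih =>
    intro acc h
    simp only [List.foldl_cons, List.map_cons, List.sum_cons]
    rw [ih (acc.modify (pyGCD p.1 x) 0 (· + p.2)) (PySem.Dict.nodup_keys_insert _ _ _ h)]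
    rw [wsum_insertAdd w acc h]
    ring

theorem sumInd_not_mem (k : Int) : ∀ (l : List (Int × Int)), k ∉ l.map Prod.fst →
    ((l.map (fun p => p.2 * (if p.1 = k then 1 else 0))).sum : Int) = 0 := by
  intro l
  induction l with
  | nil => intro _; simp
  | cons p ps ih =>
    intro h
    simp only [List.map_cons, List.mem_cons, not_or] at h
    rw [List.map_cons, List.sum_cons, ih h.2, if_neg (fun hh : p.1 = k => h.1 hh.symm)]
    ring

theorem sumInd_mem (k : Int) : ∀ (l : List (Int × Int)) (v : Int),
    (l.map Prod.fst).Nodup → (k, v) ∈ l →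
    ((l.map (fun p => p.2 * (if p.1 = k then 1 else 0))).sum : Int) = v := by
  intro l
  induction l with
  | nil => intro v _ hm; simp at hm
  | cons p ps ih =>
    intro v hnd hm
    simp only [List.map_cons, List.nodup_cons] at hnd
    rw [List.mem_cons] at hm
    simp only [List.map_cons, List.sum_cons]
    rcases hm with hm | hm
    · rw [← hm]
      rw [if_pos rfl, sumInd_not_mem k ps (by rw [← hm] at hnd; exact hnd.1)]
      ring
    · have hkps : k ∈ ps.map Prod.fst := by
        simpa using List.mem_map_of_mem (f := Prod.fst) hm
      have hne : p.1 ≠ k := fun hh => hnd.1 (hh ▸ hkps)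
      rw [if_neg hne, ih v hnd.2 hm]
      ring

theorem getD_eq_wsum_ind (d : PySem.Dict Int Int) (hnd : d.keys.Nodup) (k : Int) :
    d.getD k 0 = wsum (fun g => if g = k then 1 else 0) d := by
  unfold wsum
  by_cases hc : d.contains k = true
  · obtain ⟨v, hv⟩ : ∃ v, d.get? k = some v := by
      rw [PySem.Dict.contains_eq_isSome_get?] at hc
      exact Option.isSome_iff_exists.mp hc
    rw [PySem.Dict.getD_of_get?_eq_some d 0 hv]
    exact (sumInd_mem k d.items v hnd (PySem.Dict.mem_items_of_get?_eq_some d hv)).symm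
  · rw [PySem.Dict.getD_of_not_contains d 0 (by simpa using hc)]
    refine (sumInd_not_mem k d.items ?_).symm
    intro hk
    obtain ⟨p, hp, hp1⟩ := List.mem_map.mp hk
    have : d.contains k = true := by
      rw [PySem.Dict.contains_iff_mem_keys]
      exact hp1 ▸ PySem.Dict.mem_keys_of_mem_items d hp
    exact hc this

theorem sum_mul_add (l : List (Int × Int)) (a b : Int → Int) :
    (l.map (fun p => p.2 * (a p.1 + b p.1))).sum
      = (l.map (fun p => p.2 * a p.1)).sum + (l.map (fun p => p.2 * b p.1)).sum := by
  induction l with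
  | nil => simp
  | cons p ps ih =>
    simp only [List.map_cons, List.sum_cons, ih]
    ring

theorem d0_items (g0 : Int) :
    ((PySem.Dict.empty : PySem.Dict Int Int).modify g0 0 (· + 1)).items = [(g0, 1)] := rfl

theorem d0_nodup (g0 : Int) :
    ((PySem.Dict.empty : PySem.Dict Int Int).modify g0 0 (· + 1)).keys.Nodup := by
  exact PySem.Dict.nodup_keys_insert _ _ _ PySem.Dict.nodup_keys_empty

theorem Bmain (k : Int) : ∀ (xs : List Int) (c : Int) (d : PySem.Dict Int Int), d.keys.Nodup →
    (xs.foldl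
      (fun (st : Int × PySem.Dict Int Int) x =>
        let g0 := pyGCD 0 x
        let d0 := (PySem.Dict.empty : PySem.Dict Int Int).modify g0 0 (· + 1)
        let cur := st.2.items.foldl
          (fun (d : PySem.Dict Int Int) p => d.modify (pyGCD p.1 x) 0 (· + p.2)) d0
        (st.1 + cur.getD k 0, cur)) (c, d)).1
    = c + wsum (fun g => rowCount k g xs) d + Aref k xs := by
  intro xs
  induction xs with
  | nil =>
    intro c d _
    simp [wsum, Aref, rowCount]
  | cons x xs ih =>
    intro c d hnd
    rw [List.foldl_cons]
    dsimp only
    set g0 := pyGCD 0 x with hg0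
    set cur := d.items.foldl
      (fun (dd : PySem.Dict Int Int) p => dd.modify (pyGCD p.1 x) 0 (· + p.2))
      ((PySem.Dict.empty : PySem.Dict Int Int).modify g0 0 (· + 1)) with hcur
    have hcnd : cur.keys.Nodup := nodup_fold_keys x d.items _ (d0_nodup g0)
    rw [ih (c + cur.getD k 0) cur hcnd]
    have h1 : cur.getD k 0 = (if g0 = k then 1 else 0)
        + (d.items.map (fun p => p.2 * (if pyGCD p.1 x = k then 1 else 0))).sum := by
      rw [getD_eq_wsum_ind cur hcnd k, hcur,
        wsum_fold x (fun g => if g = k then 1 else 0) d.items _ (d0_nodup g0)]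
      unfold wsum
      rw [d0_items]
      simp
    have h2 : wsum (fun g => rowCount k g xs) cur
        = rowCount k g0 xs
          + (d.items.map (fun p => p.2 * rowCount k (pyGCD p.1 x) xs)).sum := by
      rw [hcur, wsum_fold x (fun g => rowCount k g xs) d.items _ (d0_nodup g0)]
      unfold wsum
      rw [d0_items]
      simp
    have h3 : wsum (fun g => rowCount k g (x :: xs)) d
        = (d.items.map (fun p => p.2 * (if pyGCD p.1 x = k then 1 else 0))).sum
          + (d.items.map (fun p => p.2 * rowCount k (pyGCD p.1 x) xs)).sum := by
      unfold wsum
      rw [← sum_mul_add d.items (fun g => if pyGCD g x = k then 1 else 0)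
        (fun g => rowCount k (pyGCD g x) xs)]
      rfl
    have h4 : Aref k (x :: xs)
        = (if g0 = k then 1 else 0) + rowCount k g0 xs + Aref k xs := by
      show rowCount k 0 (x :: xs) + Aref k xs = _
      show (if pyGCD 0 x = k then 1 else 0) + rowCount k (pyGCD 0 x) xs + Aref k xs = _
      rw [← hg0]
    rw [h1, h2, h3, h4]
    ring

theorem B_eq_Aref (nums : List Int) (k : Int) : subarrayGCD_alt nums k = Aref k nums := by
  unfold subarrayGCD_alt
  rw [Bmain k nums 0 PySem.Dict.empty PySem.Dict.nodup_keys_empty]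
  have : wsum (fun g => rowCount k g nums) PySem.Dict.empty = 0 := rfl
  rw [this]
  ring

-- ===== VERDICT (by name: the statement is the Claim_ definition above) =====
theorem subarrayGCD_spec : Claim_equal_subarrayGCD := by
  intro nums k _
  unfold Spec_subarrayGCD
  rw [A_eq_Aref, B_eq_Aref]
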